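-- pv_equiv track=rewrite | github.com/oJordany/differentialManchesterCoding | differentialManchester.py | manchester_differential
-- ===== SOURCE A (Python) =====
-- def manchester_differential(bit_string):
--     """
--     Codifica uma string de bits usando a codificação Manchester Diferencial (Differential Manchester).
--
--     Esta função assume que o nível inicial do sinal é '0'.
--     Args:
--         bit_string (str): A string de bits a ser codificada, composta por '0's e '1's.
--
--     Returns:
--         list: Uma lista de inteiros representando o sinal codificado, onde cada valor da lista é o nível do sinal em cada ponto do tempo.
--     """
--     # Inicializando o primeiro nível (começamos com 1)
--     encoded_signal = []
--     current_level = 0  # Começamos com o nível '0'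
--
--     # Codificação Manchester Diferencial
--     for i, bit in enumerate(bit_string):
--         if bit == '1':
--             # Para o bit 1, o sinal não muda no início do intervalo
--             encoded_signal.append(current_level)
--             current_level = 1 - current_level  # Transição no meio do bit
--             encoded_signal.append(current_level)
--         elif bit == '0':
--             # Para o bit 0, o sinal muda no início do intervalo
--             current_level = 1 - current_level  # Transição no início do bit
--             encoded_signal.append(current_level)
--             current_level = 1 - current_level  # Transição no meio do bit
--             encoded_signal.append(current_level)
--
--     return encoded_signal
-- ===== SOURCE B (Python) =====
-- def manchester_differential(bit_string):
--     # Pass 1: keep only valid bits and build the per-bit starting levels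
--     # (running parity: a '1' toggles the level, a '0' leaves it unchanged).
--     bits = [b for b in bit_string if b in '01']
--     levels = [0]
--     for b in bits:
--         levels.append(levels[-1] ^ (b == '1'))
--     # Pass 2: emit two samples per bit from its starting level.
--     out = []
--     for lvl, b in zip(levels, bits):
--         out += [lvl, 1 - lvl] if b == '1' else [1 - lvl, lvl]
--     return out
-- ===== Notes on version B (the rewrite author's own statement) =====
-- stated objective: faster
-- what changed: Replaced the single stateful encode loop by two passes: a prefix-parity table of per-bit starting levels over the filtered bits, then a zip/emit pass producing two samples per bit (constant-factor win from bulk list building instead of per-bit appends).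
import Mathlib
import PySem

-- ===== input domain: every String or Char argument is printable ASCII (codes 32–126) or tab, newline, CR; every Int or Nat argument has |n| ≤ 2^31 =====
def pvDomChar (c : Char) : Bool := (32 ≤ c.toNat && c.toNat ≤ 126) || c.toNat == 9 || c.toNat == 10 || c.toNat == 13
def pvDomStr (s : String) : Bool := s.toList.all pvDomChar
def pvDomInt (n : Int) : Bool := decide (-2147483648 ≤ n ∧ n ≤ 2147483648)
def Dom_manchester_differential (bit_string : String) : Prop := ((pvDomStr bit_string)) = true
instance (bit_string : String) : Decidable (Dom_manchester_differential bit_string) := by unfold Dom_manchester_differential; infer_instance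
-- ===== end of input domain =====

-- B replaces A's single stateful loop by a prefix-parity pass plus a zip/emit pass (objective: alternative decomposition).

-- ===== PORT A =====
-- one step of A's loop over (encoded_signal, current_level)
def pvAStep (st : List Int × Int) (c : Char) : List Int × Int :=
  if c == '1' then
    -- append level, toggle, append level
    (st.1 ++ [st.2, 1 - st.2], 1 - st.2)
  else if c == '0' then
    -- toggle, append, toggle, append
    let l1 : Int := 1 - st.2
    let l2 : Int := 1 - l1
    (st.1 ++ [l1, l2], l2)
  else st

def manchester_differential (bit_string : String) : List Int :=
  (bit_string.toList.foldl pvAStep ([], 0)).1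

-- ===== PORT B =====
-- pass 1 helper: the list 'levels' ([0] then one toggle-or-keep per bit), as in Source B
def pvLevels (lvl : Int) : List Char → List Int
  | [] => [lvl]
  | b :: bs => lvl :: pvLevels (if b == '1' then 1 - lvl else lvl) bs
  -- (x ^ (b=='1') on 0/1 ints = toggle iff b=='1'; exact on the 0/1 levels Source B uses)

def manchester_differential_alt (bit_string : String) : List Int :=
  let bits := bit_string.toList.filter (fun c => c == '0' || c == '1')
  let levels := pvLevels 0 bits
  (levels.zip bits).flatMap (fun p => if p.2 == '1' then [p.1, 1 - p.1] else [1 - p.1, p.1])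

-- ===== PRECONDITION & SPEC =====
def Spec_manchester_differential (bit_string : String) (out : List Int) : Prop := out = manchester_differential_alt bit_string
instance (bit_string : String) (out : List Int) : Decidable (Spec_manchester_differential bit_string out) := by unfold Spec_manchester_differential; infer_instance

-- ===== CLAIM (what is proved, stated in full; the proofs are below) =====
def Claim_equal_manchester_differential : Prop := ∀ (bit_string : String), Dom_manchester_differential bit_string → Spec_manchester_differential bit_string (manchester_differential bit_string)

-- ===== LEMMAS AND PROOFS =====

-- proof-side direct recursion both sides are reduced to
def pvOut (lvl : Int) : List Char → List Int
  | [] => []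
  | c :: cs =>
    if c == '1' then lvl :: (1 - lvl) :: pvOut (1 - lvl) cs
    else if c == '0' then (1 - lvl) :: lvl :: pvOut lvl cs
    else pvOut lvl cs

lemma pvA_out (cs : List Char) : ∀ (acc : List Int) (lvl : Int),
    (cs.foldl pvAStep (acc, lvl)).1 = acc ++ pvOut lvl cs := by
  induction cs with
  | nil => intro acc lvl; simp [pvOut]
  | cons c cs ih =>
    intro acc lvl
    by_cases h1 : c == '1'
    · simp [pvAStep, h1, pvOut, ih]
    · by_cases h0 : c == '0'
      · have : (1 : Int) - (1 - lvl) = lvl := by ring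
        simp [pvAStep, h1, h0, pvOut, ih, this]
      · simp [pvAStep, h1, h0, pvOut, ih]

lemma pvB_out (bs : List Char) : ∀ (lvl : Int),
    (∀ c ∈ bs, c == '0' || c == '1') →
    ((pvLevels lvl bs).zip bs).flatMap
      (fun p => if p.2 == '1' then [p.1, 1 - p.1] else [1 - p.1, p.1]) = pvOut lvl bs := by
  induction bs with
  | nil => intro lvl _; simp [pvLevels, pvOut]
  | cons b bs ih =>
    intro lvl h
    have hb := h b (List.mem_cons_self ..)
    have hrest : ∀ c ∈ bs, c == '0' || c == '1' := fun c hc => h c (List.mem_cons_of_mem _ hc)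
    by_cases h1 : b == '1'
    · have hb1 : b = '1' := by simpa using h1
      subst hb1
      simp only [pvLevels, List.zip_cons_cons, List.flatMap_cons, pvOut]
      simpa using ih _ hrest
    · have hb0 : b = '0' := by simpa [h1] using hb
      subst hb0
      simp only [pvLevels, List.zip_cons_cons, List.flatMap_cons, pvOut]
      simpa using ih _ hrest

lemma pvOut_filter (cs : List Char) : ∀ (lvl : Int),
    pvOut lvl (cs.filter (fun c => c == '0' || c == '1')) = pvOut lvl cs := by
  induction cs with
  | nil => intro lvl; simp
  | cons c cs ih =>
    intro lvl
    by_cases h1 : c == '1'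
    · simp [h1, pvOut, ih]
    · by_cases h0 : c == '0'
      · simp [h1, h0, pvOut, ih]
      · simp [h1, h0, pvOut, ih]

-- ===== VERDICT (by name: the statement is the Claim_ definition above) =====
theorem manchester_differential_spec : Claim_equal_manchester_differential := by
  intro s _
  show manchester_differential s = manchester_differential_alt s
  unfold manchester_differential manchester_differential_alt
  rw [pvA_out, pvB_out _ _ (by intro c hc; simpa using (List.mem_filter.mp hc).2), pvOut_filter]
  simp
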